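-- pv_equiv track=rewrite | github.com/aarneranta/chalmers-advanced-python | exercises/ex03/solutions.py | multi_edges2adjacency
-- ===== SOURCE A (Python) =====
-- def multi_edges2adjacency(edges):
--
--     # only this function was modified wrt edges2adjacency
--     def add_edge(adj,src,dst):
--         if not src in adj:
--             adj[src] = {dst: 1}
--         else:
--             if dst in adj[src]:
--                 adj[src][dst] += 1
--             else:
--                 adj[src][dst] = 1
--
--     adj = {}
--     for (src,dst) in edges:
--         add_edge(adj, src, dst)
--         add_edge(adj, dst, src)
--
--     return adj
-- ===== SOURCE B (Python) =====
-- def multi_edges2adjacency(edges):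
--     # pass 1: flat counter keyed by ordered (src, dst) pairs, both directions
--     cnt = {}
--     for (src, dst) in edges:
--         cnt[(src, dst)] = cnt.get((src, dst), 0) + 1
--         cnt[(dst, src)] = cnt.get((dst, src), 0) + 1
--     # pass 2: reshape the flat table into the nested adjacency dict
--     adj = {}
--     for (src, dst), n in cnt.items():
--         adj.setdefault(src, {})[dst] = n
--     return adj
-- ===== Notes on version B (the rewrite author's own statement) =====
-- stated objective: alternative
-- what changed: Replaces A's fused one-pass construction of the nested dict (branching add_edge called twice per edge) with a two-phase pipeline: first a flat counter keyed by ordered (src,dst) pairs in both directions, then a second pass reshaping the flat table into the nested adjacency dict via setdefault.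
import Mathlib
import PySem

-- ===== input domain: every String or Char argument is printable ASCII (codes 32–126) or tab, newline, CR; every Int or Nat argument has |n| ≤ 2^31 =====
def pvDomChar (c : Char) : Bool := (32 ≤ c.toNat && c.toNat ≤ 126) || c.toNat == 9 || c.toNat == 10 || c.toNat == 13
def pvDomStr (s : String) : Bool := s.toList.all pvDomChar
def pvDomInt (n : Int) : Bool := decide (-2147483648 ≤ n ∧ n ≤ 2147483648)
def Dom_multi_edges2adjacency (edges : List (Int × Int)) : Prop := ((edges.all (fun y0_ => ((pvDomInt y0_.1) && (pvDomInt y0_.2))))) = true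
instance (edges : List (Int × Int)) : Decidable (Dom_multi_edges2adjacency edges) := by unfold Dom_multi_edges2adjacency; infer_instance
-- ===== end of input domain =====

-- B replaces A's fused one-pass nested-dict construction by a two-phase pipeline
-- (flat ordered-pair counter, then reshape); alternative decomposition, same cost.

-- ===== PORT A =====
-- add_edge(adj, src, dst): mutation adj[src][dst] += 1 is modelled by insert
-- (overwrite keeps position), exactly Python's in-place update of the inner dict.
def pvAddEdge (adj : PySem.Dict Int (PySem.Dict Int Int)) (src dst : Int) :
    PySem.Dict Int (PySem.Dict Int Int) :=
  if adj.contains src = false then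
    adj.insert src ((PySem.Dict.empty).insert dst 1)
  else
    if (adj.getD src PySem.Dict.empty).contains dst then
      adj.insert src ((adj.getD src PySem.Dict.empty).insert dst
        ((adj.getD src PySem.Dict.empty).getD dst 0 + 1))
    else
      adj.insert src ((adj.getD src PySem.Dict.empty).insert dst 1)

def multi_edges2adjacency (edges : List (Int × Int)) : List (Int × List (Int × Int)) :=
  (edges.foldl (fun adj p => pvAddEdge (pvAddEdge adj p.1 p.2) p.2 p.1)
    PySem.Dict.empty).items.map (fun p => (p.1, p.2.items))

-- ===== PORT B =====
-- cnt[k] = cnt.get(k, 0) + 1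
def pvIncr (c : PySem.Dict (Int × Int) Int) (k : Int × Int) : PySem.Dict (Int × Int) Int :=
  c.insert k (c.getD k 0 + 1)

-- adj.setdefault(src, {})[dst] = n : setdefault, then in-place write to the inner dict
def pvAsmStep (adj : PySem.Dict Int (PySem.Dict Int Int)) (q : (Int × Int) × Int) :
    PySem.Dict Int (PySem.Dict Int Int) :=
  let adj2 := adj.setdefault q.1.1 PySem.Dict.empty
  adj2.insert q.1.1 ((adj2.getD q.1.1 PySem.Dict.empty).insert q.1.2 q.2)

def multi_edges2adjacency_alt (edges : List (Int × Int)) : List (Int × List (Int × Int)) :=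
  let cnt := edges.foldl (fun c p => pvIncr (pvIncr c (p.1, p.2)) (p.2, p.1)) PySem.Dict.empty
  let adj := cnt.items.foldl pvAsmStep PySem.Dict.empty
  adj.items.map (fun p => (p.1, p.2.items))

-- ===== PRECONDITION & SPEC =====
def Spec_multi_edges2adjacency (edges : List (Int × Int)) (out : List (Int × List (Int × Int))) : Prop := out = multi_edges2adjacency_alt edges
instance (edges : List (Int × Int)) (out : List (Int × List (Int × Int))) : Decidable (Spec_multi_edges2adjacency edges out) := by unfold Spec_multi_edges2adjacency; infer_instance

-- ===== CLAIM (what is proved, stated in full; the proofs are below) =====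
def Claim_equal_multi_edges2adjacency : Prop := ∀ (edges : List (Int × Int)), Dom_multi_edges2adjacency edges → Spec_multi_edges2adjacency edges (multi_edges2adjacency edges)

-- ===== LEMMAS AND PROOFS =====

-- B's second pass as a named fold (proof helper)
def pvAsm (l : List ((Int × Int) × Int)) (adj : PySem.Dict Int (PySem.Dict Int Int)) :
    PySem.Dict Int (PySem.Dict Int Int) := l.foldl pvAsmStep adj

lemma pvAsmStep_eq (adj : PySem.Dict Int (PySem.Dict Int Int)) (q : (Int × Int) × Int) :
    pvAsmStep adj q
      = adj.insert q.1.1 ((adj.getD q.1.1 PySem.Dict.empty).insert q.1.2 q.2) := by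
  unfold pvAsmStep
  by_cases h : adj.contains q.1.1 = true
  · rw [PySem.Dict.setdefault_of_contains _ _ h]
  · have h' : adj.contains q.1.1 = false := by simpa using h
    rw [PySem.Dict.setdefault_of_not_contains _ _ h']
    show (adj.insert q.1.1 PySem.Dict.empty).insert q.1.1
        (((adj.insert q.1.1 PySem.Dict.empty).getD q.1.1 PySem.Dict.empty).insert q.1.2 q.2) = _
    rw [PySem.Dict.getD_insert_self, PySem.Dict.insert_insert_self,
        PySem.Dict.getD_of_not_contains _ _ h']

-- two inserts at distinct keys commute when the first key is already present
lemma pvInsert_comm {κ ν : Type} [BEq κ] [LawfulBEq κ] (A : PySem.Dict κ ν)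
    {k k' : κ} (X Y : ν) (hne : k ≠ k') (hc : A.contains k = true) :
    (A.insert k X).insert k' Y = (A.insert k' Y).insert k X := by
  apply PySem.Dict.ext
  by_cases hc' : A.contains k' = true
  · rw [PySem.Dict.items_insert_of_contains _ Y
          (by rw [PySem.Dict.contains_insert]; simp [hc']),
        PySem.Dict.items_insert_of_contains _ X hc,
        PySem.Dict.items_insert_of_contains _ X
          (by rw [PySem.Dict.contains_insert]; simp [hc]),
        PySem.Dict.items_insert_of_contains _ Y hc', List.map_map, List.map_map]
    refine List.map_congr_left (fun p _ => ?_)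
    simp only [Function.comp_apply, beq_iff_eq]
    by_cases h1 : p.1 = k <;> by_cases h2 : p.1 = k' <;>
      simp [h1, h2, hne, Ne.symm hne]
  · have hc'f : A.contains k' = false := by simpa using hc'
    rw [PySem.Dict.items_insert_of_not_contains _ Y
          (by rw [PySem.Dict.contains_insert]; simp [hc'f, Ne.symm hne]),
        PySem.Dict.items_insert_of_contains _ X hc,
        PySem.Dict.items_insert_of_contains _ X
          (by rw [PySem.Dict.contains_insert]; simp [hc]),
        PySem.Dict.items_insert_of_not_contains _ Y hc'f, List.map_append]
    simp [Ne.symm hne]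

lemma pvMapRepl_id {α β : Type} [BEq α] [LawfulBEq α] (k : α) (v : β) :
    ∀ (l : List (α × β)), k ∉ l.map (·.1) →
      l.map (fun q => if q.1 == k then (k, v) else q) = l := by
  intro l h
  induction l with
  | nil => rfl
  | cons x t ih =>
    simp only [List.map_cons, List.mem_cons, not_or] at h
    have hx : x.1 ≠ k := fun e => h.1 e.symm
    simp [beq_iff_eq, hx, ih h.2]

-- pushing a value-override at a key pair (s,d) already present past an assembly fold
-- that never touches (s,d)
lemma pvAsm_insert_comm (s d w : Int) :
    ∀ (t : List ((Int × Int) × Int)) (A : PySem.Dict Int (PySem.Dict Int Int)),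
      A.contains s = true → (A.getD s PySem.Dict.empty).contains d = true →
      (s, d) ∉ t.map (·.1) →
      pvAsm t (A.insert s ((A.getD s PySem.Dict.empty).insert d w))
        = (pvAsm t A).insert s (((pvAsm t A).getD s PySem.Dict.empty).insert d w) := by
  intro t
  induction t with
  | nil => intro A _ _ _; rfl
  | cons q t ih =>
    intro A hA hI hmem
    simp only [List.map_cons, List.mem_cons, not_or] at hmem
    obtain ⟨hq, hmem⟩ := hmem
    show pvAsm t (pvAsmStep (A.insert s ((A.getD s PySem.Dict.empty).insert d w)) q)
        = _
    by_cases hs : q.1.1 = s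
    · -- same outer key, different inner key
      have hd : q.1.2 ≠ d := fun e => hq (by rw [Prod.ext_iff]; exact ⟨hs.symm, e.symm⟩)
      have step1 : pvAsmStep (A.insert s ((A.getD s PySem.Dict.empty).insert d w)) q
          = (pvAsmStep A q).insert s (((pvAsmStep A q).getD s PySem.Dict.empty).insert d w) := by
        rw [pvAsmStep_eq, pvAsmStep_eq, hs, PySem.Dict.getD_insert_self,
            PySem.Dict.insert_insert_self, PySem.Dict.getD_insert_self,
            PySem.Dict.insert_insert_self,
            pvInsert_comm _ _ _ (fun e => hd e.symm) hI]
      rw [step1]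
      have hA' : (pvAsmStep A q).contains s = true := by
        rw [pvAsmStep_eq, PySem.Dict.contains_insert]; simp [hA]
      have hI' : ((pvAsmStep A q).getD s PySem.Dict.empty).contains d = true := by
        rw [pvAsmStep_eq, hs, PySem.Dict.getD_insert_self, PySem.Dict.contains_insert]
        simp [hI]
      exact ih (pvAsmStep A q) hA' hI' hmem
    · -- different outer key
      have step1 : pvAsmStep (A.insert s ((A.getD s PySem.Dict.empty).insert d w)) q
          = (pvAsmStep A q).insert s (((pvAsmStep A q).getD s PySem.Dict.empty).insert d w) := by
        rw [pvAsmStep_eq, pvAsmStep_eq,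
            PySem.Dict.getD_insert_of_ne _ _ _ hs,
            PySem.Dict.getD_insert_of_ne _ _ _ (fun e => hs e.symm) ]
        exact pvInsert_comm A _ _ (fun e => hs e.symm) hA
      rw [step1]
      have hA' : (pvAsmStep A q).contains s = true := by
        rw [pvAsmStep_eq, PySem.Dict.contains_insert]; simp [hA]
      have hI' : ((pvAsmStep A q).getD s PySem.Dict.empty).contains d = true := by
        rw [pvAsmStep_eq, PySem.Dict.getD_insert_of_ne _ _ _ (fun e => hs e.symm)]
        exact hI
      have := ih (pvAsmStep A q) hA' hI' hmem
      exact this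

-- inner-key membership in the assembled dict = pair membership in the flat list
lemma pvAsm_inner_contains (s d : Int) :
    ∀ (l : List ((Int × Int) × Int)) (adj : PySem.Dict Int (PySem.Dict Int Int)),
      (((pvAsm l adj).getD s PySem.Dict.empty).contains d = true ↔
        (s, d) ∈ l.map (·.1) ∨ (adj.getD s PySem.Dict.empty).contains d = true) := by
  intro l
  induction l with
  | nil => intro adj; simp [pvAsm]
  | cons q t ih =>
    intro adj
    show ((pvAsm t (pvAsmStep adj q)).getD s PySem.Dict.empty).contains d = true ↔ _
    rw [ih]
    by_cases hs : q.1.1 = s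
    · rw [pvAsmStep_eq, hs, PySem.Dict.getD_insert_self, PySem.Dict.contains_insert]
      simp only [List.map_cons, List.mem_cons, Bool.or_eq_true, beq_iff_eq, Prod.ext_iff]
      constructor <;> intro hh <;> tauto
    · rw [pvAsmStep_eq, PySem.Dict.getD_insert_of_ne _ _ _ (fun e => hs e.symm)]
      simp only [List.map_cons, List.mem_cons, Prod.ext_iff]
      have hs' : ¬ s = q.1.1 := fun e => hs e.symm
      constructor <;> intro hh <;> tauto

-- the assembled value at a pair untouched by the fold is unchanged
lemma pvAsm_preserve (s d : Int) :
    ∀ (t : List ((Int × Int) × Int)) (A : PySem.Dict Int (PySem.Dict Int Int)),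
      (s, d) ∉ t.map (·.1) →
      ((pvAsm t A).getD s PySem.Dict.empty).getD d 0
        = (A.getD s PySem.Dict.empty).getD d 0 := by
  intro t
  induction t with
  | nil => intro A _; rfl
  | cons q t ih =>
    intro A hmem
    simp only [List.map_cons, List.mem_cons, not_or] at hmem
    obtain ⟨hq, hmem⟩ := hmem
    show ((pvAsm t (pvAsmStep A q)).getD s PySem.Dict.empty).getD d 0 = _
    rw [ih _ hmem]
    by_cases hs : q.1.1 = s
    · have hd : q.1.2 ≠ d := fun e => hq (by rw [Prod.ext_iff]; exact ⟨hs.symm, e.symm⟩)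
      rw [pvAsmStep_eq, hs, PySem.Dict.getD_insert_self,
          PySem.Dict.getD_insert_of_ne _ _ _ (fun e => hd e.symm)]
    · rw [pvAsmStep_eq, PySem.Dict.getD_insert_of_ne _ _ _ (fun e => hs e.symm)]

-- the assembled value at a pair present in a nodup flat list is the listed count
lemma pvAsm_inner_val (s d n : Int) :
    ∀ (l : List ((Int × Int) × Int)) (adj : PySem.Dict Int (PySem.Dict Int Int)),
      (l.map (·.1)).Nodup → ((s, d), n) ∈ l →
      ((pvAsm l adj).getD s PySem.Dict.empty).getD d 0 = n := by
  intro l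
  induction l with
  | nil => intro adj _ h; exact absurd h (List.not_mem_nil)
  | cons q t ih =>
    intro adj hnd hmem
    simp only [List.map_cons, List.nodup_cons] at hnd
    show ((pvAsm t (pvAsmStep adj q)).getD s PySem.Dict.empty).getD d 0 = n
    rcases List.mem_cons.mp hmem with h | h
    · have hq1 : (s, d) = q.1 := congrArg Prod.fst h
      have hkey : (s, d) ∉ t.map (·.1) := by rw [hq1]; exact hnd.1
      rw [pvAsm_preserve s d t _ hkey, ← h, pvAsmStep_eq,
          PySem.Dict.getD_insert_self, PySem.Dict.getD_insert_self]
    · exact ih _ hnd.2 h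

-- replacing the (unique) value at pair (s,d) in the flat list = one overwrite
-- in the assembled dict
lemma pvAsm_map_repl (s d w : Int) :
    ∀ (l : List ((Int × Int) × Int)) (adj : PySem.Dict Int (PySem.Dict Int Int)),
      (l.map (·.1)).Nodup → (s, d) ∈ l.map (·.1) →
      pvAsm (l.map (fun q => if q.1 == (s, d) then ((s, d), w) else q)) adj
        = (pvAsm l adj).insert s (((pvAsm l adj).getD s PySem.Dict.empty).insert d w) := by
  intro l
  induction l with
  | nil => intro adj _ h; exact absurd h (List.not_mem_nil)
  | cons q t ih =>
    intro adj hnd hmem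
    simp only [List.map_cons, List.nodup_cons] at hnd
    by_cases hq : q.1 = (s, d)
    · -- the head is the replaced entry; the tail is untouched
      have htail : (s, d) ∉ t.map (·.1) := by rw [← hq]; exact hnd.1
      have hrepl : (q :: t).map (fun q => if q.1 == (s, d) then ((s, d), w) else q)
          = ((s, d), w) :: t := by
        rw [List.map_cons, pvMapRepl_id (s, d) w t htail]
        simp [hq]
      rw [hrepl]
      show pvAsm t (pvAsmStep adj ((s, d), w)) = _
      have hstep : pvAsmStep adj ((s, d), w)
          = (pvAsmStep adj q).insert s
              (((pvAsmStep adj q).getD s PySem.Dict.empty).insert d w) := by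
        rw [pvAsmStep_eq, pvAsmStep_eq, hq, PySem.Dict.getD_insert_self,
            PySem.Dict.insert_insert_self, PySem.Dict.insert_insert_self]
      rw [hstep]
      have hA : (pvAsmStep adj q).contains s = true := by
        rw [pvAsmStep_eq, hq]; exact PySem.Dict.contains_insert_self _ _ _
      have hI : ((pvAsmStep adj q).getD s PySem.Dict.empty).contains d = true := by
        rw [pvAsmStep_eq, hq, PySem.Dict.getD_insert_self]
        exact PySem.Dict.contains_insert_self _ _ _
      exact pvAsm_insert_comm s d w t (pvAsmStep adj q) hA hI htail
    · -- the head is untouched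
      have hmem' : (s, d) ∈ t.map (·.1) := by
        rcases List.mem_cons.mp hmem with h | h
        · exact absurd h.symm hq
        · exact h
      have hq' : (q.1 == (s, d)) = false := by simp [hq]
      rw [List.map_cons]
      simp only [hq', Bool.false_eq_true, if_false]
      show pvAsm (t.map _) (pvAsmStep adj q) = _
      exact ih (pvAsmStep adj q) hnd.2 hmem'

-- one counter increment corresponds to one add_edge on the assembled dict
lemma pvStep_lemma (c : PySem.Dict (Int × Int) Int) (s d : Int)
    (hnd : c.keys.Nodup) :
    pvAsm (pvIncr c (s, d)).items PySem.Dict.empty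
      = pvAddEdge (pvAsm c.items PySem.Dict.empty) s d := by
  have hkeys : c.keys = c.items.map (·.1) := rfl
  have hinner : ((pvAsm c.items PySem.Dict.empty).getD s PySem.Dict.empty).contains d = true
      ↔ c.contains (s, d) = true := by
    rw [pvAsm_inner_contains s d c.items PySem.Dict.empty,
        PySem.Dict.getD_empty, PySem.Dict.contains_empty]
    simp [PySem.Dict.contains_iff_mem_keys, hkeys]
  by_cases hc : c.contains (s, d) = true
  · -- the pair is already counted: A increments in place
    obtain ⟨n, hn⟩ : ∃ n, c.get? (s, d) = some n := by
      rw [PySem.Dict.contains_eq_isSome_get?] at hc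
      exact Option.isSome_iff_exists.mp hc
    have hmemit : ((s, d), n) ∈ c.items := PySem.Dict.mem_items_of_get?_eq_some c hn
    have hmemkey : (s, d) ∈ c.items.map (·.1) := by
      have := PySem.Dict.mem_keys_of_mem_items c hmemit
      rwa [hkeys] at this
    have hgd : c.getD (s, d) 0 = n := PySem.Dict.getD_of_mem_items c hmemit hnd 0
    have hitems : (pvIncr c (s, d)).items
        = c.items.map (fun q => if q.1 == (s, d) then ((s, d), n + 1) else q) := by
      show (c.insert (s, d) (c.getD (s, d) 0 + 1)).items = _
      rw [PySem.Dict.items_insert_of_contains c _ hc, hgd]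
    rw [hitems, pvAsm_map_repl s d (n + 1) c.items PySem.Dict.empty
          (by rw [← hkeys]; exact hnd) hmemkey]
    have hcontd : ((pvAsm c.items PySem.Dict.empty).getD s PySem.Dict.empty).contains d = true :=
      hinner.mpr hc
    have hconts : (pvAsm c.items PySem.Dict.empty).contains s = true := by
      by_contra h
      have h' : (pvAsm c.items PySem.Dict.empty).contains s = false := by simpa using h
      rw [PySem.Dict.getD_of_not_contains _ _ h', PySem.Dict.contains_empty] at hcontd
      exact absurd hcontd (by simp)
    have hval : ((pvAsm c.items PySem.Dict.empty).getD s PySem.Dict.empty).getD d 0 = n :=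
      pvAsm_inner_val s d n c.items PySem.Dict.empty (by rw [← hkeys]; exact hnd) hmemit
    unfold pvAddEdge
    rw [if_neg (by simp [hconts]), if_pos hcontd, hval]
  · -- fresh pair: the counter appends, A starts a fresh inner entry at 1
    have hc' : c.contains (s, d) = false := by simpa using hc
    have hitems : (pvIncr c (s, d)).items = c.items ++ [((s, d), 1)] := by
      show (c.insert (s, d) (c.getD (s, d) 0 + 1)).items = _
      rw [PySem.Dict.getD_of_not_contains _ _ hc',
          PySem.Dict.items_insert_of_not_contains c _ hc']
      norm_num
    have hcontd : ((pvAsm c.items PySem.Dict.empty).getD s PySem.Dict.empty).contains d = false := by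
      rw [← Bool.not_eq_true]
      intro h
      rw [hinner] at h
      exact absurd h (by simp [hc'])
    rw [hitems]
    show pvAsm (c.items ++ [((s, d), 1)]) PySem.Dict.empty = _
    have happ : pvAsm (c.items ++ [((s, d), 1)]) PySem.Dict.empty
        = pvAsmStep (pvAsm c.items PySem.Dict.empty) ((s, d), 1) := by
      unfold pvAsm
      rw [List.foldl_append]
      rfl
    rw [happ, pvAsmStep_eq]
    unfold pvAddEdge
    by_cases hconts : (pvAsm c.items PySem.Dict.empty).contains s = true
    · rw [if_neg (by simp [hconts]), if_neg (by simp [hcontd])]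
    · have h' : (pvAsm c.items PySem.Dict.empty).contains s = false := by simpa using hconts
      rw [if_pos h', PySem.Dict.getD_of_not_contains _ _ h']

-- main invariant: assembling the counter built so far equals A's fold so far
lemma pvMain :
    ∀ (es : List (Int × Int)) (c : PySem.Dict (Int × Int) Int), c.keys.Nodup →
      pvAsm (es.foldl (fun c p => pvIncr (pvIncr c (p.1, p.2)) (p.2, p.1)) c).items
          PySem.Dict.empty
        = es.foldl (fun adj p => pvAddEdge (pvAddEdge adj p.1 p.2) p.2 p.1)
            (pvAsm c.items PySem.Dict.empty) := by
  intro es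
  induction es with
  | nil => intro c _; rfl
  | cons p t ih =>
    intro c hnd
    have hnd1 : (pvIncr c (p.1, p.2)).keys.Nodup :=
      PySem.Dict.nodup_keys_insert _ _ _ hnd
    have hnd2 : (pvIncr (pvIncr c (p.1, p.2)) (p.2, p.1)).keys.Nodup :=
      PySem.Dict.nodup_keys_insert _ _ _ hnd1
    show pvAsm ((t.foldl _ (pvIncr (pvIncr c (p.1, p.2)) (p.2, p.1)))).items
        PySem.Dict.empty = _
    rw [ih _ hnd2, pvStep_lemma _ _ _ hnd1, pvStep_lemma _ _ _ hnd]
    rfl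

-- ===== VERDICT (by name: the statement is the Claim_ definition above) =====
theorem multi_edges2adjacency_spec : Claim_equal_multi_edges2adjacency := by
  intro edges _
  show multi_edges2adjacency edges = multi_edges2adjacency_alt edges
  unfold multi_edges2adjacency multi_edges2adjacency_alt
  have h := pvMain edges PySem.Dict.empty PySem.Dict.nodup_keys_empty
  have hempty : pvAsm (PySem.Dict.empty : PySem.Dict (Int × Int) Int).items
      PySem.Dict.empty = PySem.Dict.empty := rfl
  rw [hempty] at h
  exact (congrArg (fun d => List.map (fun p => (p.1, p.2.items)) d.items) h).symm
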